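-- pv_equiv track=rewrite | github.com/Atharvachavangit/OIBSIP- | Password Generator/OIBSIP Python task 2. Password_Generator.py | build_pools
-- ===== SOURCE A (Python) =====
-- import string
--
-- AMBIGUOUS = set("Il1O0")
--
-- def build_pools(lower, upper, digits, symbols, exclude_chars: set, remove_ambiguous: bool):
--     pools = {}
--     if lower:
--         pools['lower'] = ''.join(ch for ch in string.ascii_lowercase if ch not in exclude_chars)
--     if upper:
--         pools['upper'] = ''.join(ch for ch in string.ascii_uppercase if ch not in exclude_chars)
--     if digits:
--         pools['digits'] = ''.join(ch for ch in string.digits if ch not in exclude_chars)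
--     if symbols:
--         pools['symbols'] = ''.join(ch for ch in string.punctuation if ch not in exclude_chars)
--
--     if remove_ambiguous:
--         for key in list(pools.keys()):
--             pools[key] = ''.join(ch for ch in pools[key] if ch not in AMBIGUOUS)
--
--     return {k: v for k, v in pools.items() if v}
-- ===== SOURCE B (Python) =====
-- import string
--
-- AMBIGUOUS = set("Il1O0")
--
-- def build_pools(lower, upper, digits, symbols, exclude_chars: set, remove_ambiguous: bool):
--     enabled = {'lower': lower, 'upper': upper, 'digits': digits, 'symbols': symbols}
--     buckets = {'lower': [], 'upper': [], 'digits': [], 'symbols': []}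
--     for code in range(33, 127):
--         ch = chr(code)
--         if ch in exclude_chars or (remove_ambiguous and ch in AMBIGUOUS):
--             continue
--         if 97 <= code <= 122:
--             cat = 'lower'
--         elif 65 <= code <= 90:
--             cat = 'upper'
--         elif 48 <= code <= 57:
--             cat = 'digits'
--         else:
--             cat = 'symbols'
--         if enabled[cat]:
--             buckets[cat].append(ch)
--     return {k: ''.join(v) for k, v in buckets.items() if enabled[k] and v}
-- ===== Notes on version B (the rewrite author's own statement) =====
-- stated objective: alternative
-- what changed: B inverts the traversal: instead of A's four per-class filter comprehensions followed by a second ambiguity-removal pass over the dict, B makes a single scan over ASCII codes 33-126, skips excluded/ambiguous characters once, classifies each remaining character by its code range, and appends it to its class bucket, emitting non-empty enabled buckets at the end.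
import Mathlib
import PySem

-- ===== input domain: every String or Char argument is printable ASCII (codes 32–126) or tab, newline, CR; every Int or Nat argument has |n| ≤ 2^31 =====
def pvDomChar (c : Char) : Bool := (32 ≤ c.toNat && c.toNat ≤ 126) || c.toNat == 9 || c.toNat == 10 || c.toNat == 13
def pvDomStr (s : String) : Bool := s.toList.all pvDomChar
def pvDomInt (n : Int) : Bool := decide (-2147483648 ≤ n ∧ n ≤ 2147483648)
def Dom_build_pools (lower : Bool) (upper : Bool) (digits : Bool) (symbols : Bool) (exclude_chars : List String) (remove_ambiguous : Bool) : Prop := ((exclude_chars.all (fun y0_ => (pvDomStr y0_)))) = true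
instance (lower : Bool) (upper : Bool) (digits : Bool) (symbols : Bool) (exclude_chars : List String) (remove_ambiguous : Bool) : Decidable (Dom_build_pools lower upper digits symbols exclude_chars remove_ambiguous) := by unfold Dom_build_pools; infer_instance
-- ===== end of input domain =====

-- B inverts the traversal: one scan over ASCII codes 33–126 dispatching each kept character
-- into its class bucket, instead of A's per-class filters plus a second ambiguity pass (objective: alternative).

-- ===== PORT A =====
-- string.ascii_lowercase / ascii_uppercase / digits / punctuation, as lists of characters
def pvLower : List Char := "abcdefghijklmnopqrstuvwxyz".toList
def pvUpper : List Char := "ABCDEFGHIJKLMNOPQRSTUVWXYZ".toList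
def pvDigits : List Char := "0123456789".toList
def pvPunct : List Char := "!\"#$%&'()*+,-./:;<=>?@[\\]^_`{|}~".toList

-- AMBIGUOUS = set("Il1O0") : a set of one-character strings
def pvAmbiguous : PySem.Set String := PySem.Set.ofList ["I", "l", "1", "O", "0"]

-- ''.join(ch for ch in src if ch not in exclude_chars)
def pvJoinFilter (src : List Char) (exclude_chars : List String) : String :=
  String.ofList (src.filter (fun ch => !(exclude_chars.contains (String.singleton ch))))

def build_pools (lower : Bool) (upper : Bool) (digits : Bool) (symbols : Bool) (exclude_chars : List String) (remove_ambiguous : Bool) : List (String × String) :=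
  let pools : PySem.Dict String String := PySem.Dict.empty
  let pools := if lower then pools.insert "lower" (pvJoinFilter pvLower exclude_chars) else pools
  let pools := if upper then pools.insert "upper" (pvJoinFilter pvUpper exclude_chars) else pools
  let pools := if digits then pools.insert "digits" (pvJoinFilter pvDigits exclude_chars) else pools
  let pools := if symbols then pools.insert "symbols" (pvJoinFilter pvPunct exclude_chars) else pools
  -- for key in list(pools.keys()): pools[key] = ''.join(ch for ch in pools[key] if ch not in AMBIGUOUS)
  -- (Dict.modify with default "" is exact here: every visited key is present)
  let pools := if remove_ambiguous then
      (PySem.Dict.keys pools).foldl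
        (fun d k => PySem.Dict.modify d k ""
          (fun v => String.ofList (v.toList.filter (fun ch => !(pvAmbiguous.contains (String.singleton ch))))))
        pools
    else pools
  -- {k: v for k, v in pools.items() if v}
  ((PySem.Dict.items pools).foldl
    (fun d kv => if kv.2 ≠ "" then PySem.Dict.insert d kv.1 kv.2 else d)
    (PySem.Dict.empty : PySem.Dict String String)).items

-- ===== PORT B =====
-- chr(code); every code visited lies in 33..126, where Char.ofNat code.toNat is exact
def pvChr (code : Int) : Char := Char.ofNat code.toNat

-- the loop body of B's single scan (buckets = (lower, upper, digits, symbols)); ch = chr(code) inlined as pvChr code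
def pvStepB (lower : Bool) (upper : Bool) (digits : Bool) (symbols : Bool)
    (exclude_chars : List String) (remove_ambiguous : Bool)
    (b : List Char × List Char × List Char × List Char) (code : Int) :
    List Char × List Char × List Char × List Char :=
  if exclude_chars.contains (String.singleton (pvChr code))
      || (remove_ambiguous && pvAmbiguous.contains (String.singleton (pvChr code))) then b
  else if 97 ≤ code ∧ code ≤ 122 then
    (if lower then (b.1 ++ [pvChr code], b.2.1, b.2.2.1, b.2.2.2) else b)
  else if 65 ≤ code ∧ code ≤ 90 then
    (if upper then (b.1, b.2.1 ++ [pvChr code], b.2.2.1, b.2.2.2) else b)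
  else if 48 ≤ code ∧ code ≤ 57 then
    (if digits then (b.1, b.2.1, b.2.2.1 ++ [pvChr code], b.2.2.2) else b)
  else
    (if symbols then (b.1, b.2.1, b.2.2.1, b.2.2.2 ++ [pvChr code]) else b)

def build_pools_alt (lower : Bool) (upper : Bool) (digits : Bool) (symbols : Bool) (exclude_chars : List String) (remove_ambiguous : Bool) : List (String × String) :=
  let bs := (PySem.List.pyRange 33 127 1).foldl
    (pvStepB lower upper digits symbols exclude_chars remove_ambiguous) ([], [], [], [])
  -- {k: ''.join(v) for k, v in buckets.items() if enabled[k] and v}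
  ([("lower", lower, bs.1), ("upper", upper, bs.2.1),
    ("digits", digits, bs.2.2.1), ("symbols", symbols, bs.2.2.2)] :
      List (String × Bool × List Char)).foldl
    (fun acc e => if e.2.1 && !e.2.2.isEmpty then acc ++ [(e.1, String.ofList e.2.2)] else acc) []

-- ===== PRECONDITION & SPEC =====
def Spec_build_pools (lower : Bool) (upper : Bool) (digits : Bool) (symbols : Bool) (exclude_chars : List String) (remove_ambiguous : Bool) (out : List (String × String)) : Prop := out = build_pools_alt lower upper digits symbols exclude_chars remove_ambiguous
instance (lower : Bool) (upper : Bool) (digits : Bool) (symbols : Bool) (exclude_chars : List String) (remove_ambiguous : Bool) (out : List (String × String)) : Decidable (Spec_build_pools lower upper digits symbols exclude_chars remove_ambiguous out) := by unfold Spec_build_pools; infer_instance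

-- ===== CLAIM (what is proved, stated in full; the proofs are below) =====
def Claim_equal_build_pools : Prop := ∀ (lower : Bool) (upper : Bool) (digits : Bool) (symbols : Bool) (exclude_chars : List String) (remove_ambiguous : Bool), Dom_build_pools lower upper digits symbols exclude_chars remove_ambiguous → Spec_build_pools lower upper digits symbols exclude_chars remove_ambiguous (build_pools lower upper digits symbols exclude_chars remove_ambiguous)

-- ===== LEMMAS AND PROOFS =====

-- keep ch = "not excluded and (if remove_ambiguous) not ambiguous"
def pvKeep (ex : List String) (ra : Bool) (ch : Char) : Bool :=
  !(ex.contains (String.singleton ch) || (ra && pvAmbiguous.contains (String.singleton ch)))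

def pcL (x : Int) : Bool := decide (97 ≤ x ∧ x ≤ 122)
def pcU (x : Int) : Bool := decide (65 ≤ x ∧ x ≤ 90)
def pcD (x : Int) : Bool := decide (48 ≤ x ∧ x ≤ 57)

def pSelL (ex : List String) (ra : Bool) (x : Int) : Bool := pvKeep ex ra (pvChr x) && pcL x
def pSelU (ex : List String) (ra : Bool) (x : Int) : Bool := pvKeep ex ra (pvChr x) && !pcL x && pcU x
def pSelD (ex : List String) (ra : Bool) (x : Int) : Bool := pvKeep ex ra (pvChr x) && !pcL x && !pcU x && pcD x
def pSelS (ex : List String) (ra : Bool) (x : Int) : Bool := pvKeep ex ra (pvChr x) && !pcL x && !pcU x && !pcD x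

-- characterisation of B's scan: each bucket collects its selected codes, in order
theorem foldB (l u d s : Bool) (ex : List String) (ra : Bool) (codes : List Int)
    (a b c e : List Char) :
    codes.foldl (pvStepB l u d s ex ra) (a, b, c, e)
      = (a ++ (if l then (codes.filter (pSelL ex ra)).map pvChr else []),
         b ++ (if u then (codes.filter (pSelU ex ra)).map pvChr else []),
         c ++ (if d then (codes.filter (pSelD ex ra)).map pvChr else []),
         e ++ (if s then (codes.filter (pSelS ex ra)).map pvChr else [])) := by
  induction codes generalizing a b c e with
  | nil => simp
  | cons x xs ih =>
    simp only [List.foldl_cons]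
    cases hkv : (ex.contains (String.singleton (pvChr x))
        || (ra && pvAmbiguous.contains (String.singleton (pvChr x)))) with
    | true =>
      have hkeep : pvKeep ex ra (pvChr x) = false := by unfold pvKeep; rw [hkv]; rfl
      have hL : pSelL ex ra x = false := by simp [pSelL, hkeep]
      have hU : pSelU ex ra x = false := by simp [pSelU, hkeep]
      have hD : pSelD ex ra x = false := by simp [pSelD, hkeep]
      have hS : pSelS ex ra x = false := by simp [pSelS, hkeep]
      have hstep : pvStepB l u d s ex ra (a, b, c, e) x = (a, b, c, e) := by
        unfold pvStepB; rw [if_pos hkv]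
      rw [hstep, ih]
      simp [List.filter_cons, hL, hU, hD, hS]
    | false =>
      have hkeep : pvKeep ex ra (pvChr x) = true := by unfold pvKeep; rw [hkv]; rfl
      have hkn : ¬ ((ex.contains (String.singleton (pvChr x))
          || (ra && pvAmbiguous.contains (String.singleton (pvChr x)))) = true) := by
        rw [hkv]; exact Bool.false_ne_true
      by_cases h1 : 97 ≤ x ∧ x ≤ 122
      · have hL : pSelL ex ra x = true := by simp [pSelL, hkeep, pcL, h1]
        have hU : pSelU ex ra x = false := by simp [pSelU, pcL, h1]
        have hD : pSelD ex ra x = false := by simp [pSelD, pcL, h1]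
        have hS : pSelS ex ra x = false := by simp [pSelS, pcL, h1]
        have hstep : pvStepB l u d s ex ra (a, b, c, e) x
            = if l then (a ++ [pvChr x], b, c, e) else (a, b, c, e) := by
          unfold pvStepB; rw [if_neg hkn, if_pos h1]
        rw [hstep]
        cases l <;> simp [List.filter_cons, hL, hU, hD, hS, ih]
      · by_cases h2 : 65 ≤ x ∧ x ≤ 90
        · have hL : pSelL ex ra x = false := by simp [pSelL, pcL, h1]
          have hU : pSelU ex ra x = true := by simp [pSelU, hkeep, pcL, pcU, h1, h2]
          have hD : pSelD ex ra x = false := by simp [pSelD, pcU, h2]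
          have hS : pSelS ex ra x = false := by simp [pSelS, pcU, h2]
          have hstep : pvStepB l u d s ex ra (a, b, c, e) x
              = if u then (a, b ++ [pvChr x], c, e) else (a, b, c, e) := by
            unfold pvStepB; rw [if_neg hkn, if_neg h1, if_pos h2]
          rw [hstep]
          cases u <;> simp [List.filter_cons, hL, hU, hD, hS, ih]
        · by_cases h3 : 48 ≤ x ∧ x ≤ 57
          · have hL : pSelL ex ra x = false := by simp [pSelL, pcL, h1]
            have hU : pSelU ex ra x = false := by simp [pSelU, pcU, h2]
            have hD : pSelD ex ra x = true := by simp [pSelD, hkeep, pcL, pcU, pcD, h1, h2, h3]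
            have hS : pSelS ex ra x = false := by simp [pSelS, pcD, h3]
            have hstep : pvStepB l u d s ex ra (a, b, c, e) x
                = if d then (a, b, c ++ [pvChr x], e) else (a, b, c, e) := by
              unfold pvStepB; rw [if_neg hkn, if_neg h1, if_neg h2, if_pos h3]
            rw [hstep]
            cases d <;> simp [List.filter_cons, hL, hU, hD, hS, ih]
          · have hL : pSelL ex ra x = false := by simp [pSelL, pcL, h1]
            have hU : pSelU ex ra x = false := by simp [pSelU, pcU, h2]
            have hD : pSelD ex ra x = false := by simp [pSelD, pcD, h3]
            have hS : pSelS ex ra x = true := by simp [pSelS, hkeep, pcL, pcU, pcD, h1, h2, h3]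
            have hstep : pvStepB l u d s ex ra (a, b, c, e) x
                = if s then (a, b, c, e ++ [pvChr x]) else (a, b, c, e) := by
              unfold pvStepB; rw [if_neg hkn, if_neg h1, if_neg h2, if_neg h3]
            rw [hstep]
            cases s <;> simp [List.filter_cons, hL, hU, hD, hS, ih]

-- the selected codes of each class, mapped to characters, are that class's alphabet filtered by keep
theorem bucketL (ex : List String) (ra : Bool) :
    ((PySem.List.pyRange 33 127 1).filter (pSelL ex ra)).map pvChr
      = pvLower.filter (pvKeep ex ra) := by
  have h1 : (PySem.List.pyRange 33 127 1).filter (pSelL ex ra)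
      = ((PySem.List.pyRange 33 127 1).filter pcL).filter (fun x => pvKeep ex ra (pvChr x)) := by
    rw [List.filter_filter]
    exact List.filter_congr fun x _ => by cases hk : pvKeep ex ra (pvChr x) <;> cases hl : pcL x <;> simp [pSelL, hk, hl]
  have h2 : (PySem.List.pyRange 33 127 1).filter pcL
      = ([97,98,99,100,101,102,103,104,105,106,107,108,109,110,111,112,113,114,115,116,117,118,119,120,121,122] : List Int) := by decide
  have h3 : pvLower = ([97,98,99,100,101,102,103,104,105,106,107,108,109,110,111,112,113,114,115,116,117,118,119,120,121,122] : List Int).map pvChr := by decide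
  rw [h1, h2, h3, List.filter_map]
  rfl
theorem bucketU (ex : List String) (ra : Bool) :
    ((PySem.List.pyRange 33 127 1).filter (pSelU ex ra)).map pvChr
      = pvUpper.filter (pvKeep ex ra) := by
  have h1 : (PySem.List.pyRange 33 127 1).filter (pSelU ex ra)
      = ((PySem.List.pyRange 33 127 1).filter (fun x => !pcL x && pcU x)).filter
          (fun x => pvKeep ex ra (pvChr x)) := by
    rw [List.filter_filter]
    exact List.filter_congr fun x _ => by cases hk : pvKeep ex ra (pvChr x) <;> cases hl : pcL x <;> cases hu : pcU x <;> simp [pSelU, hk, hl, hu]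
  have h2 : (PySem.List.pyRange 33 127 1).filter (fun x => !pcL x && pcU x)
      = ([65,66,67,68,69,70,71,72,73,74,75,76,77,78,79,80,81,82,83,84,85,86,87,88,89,90] : List Int) := by decide
  have h3 : pvUpper = ([65,66,67,68,69,70,71,72,73,74,75,76,77,78,79,80,81,82,83,84,85,86,87,88,89,90] : List Int).map pvChr := by decide
  rw [h1, h2, h3, List.filter_map]
  rfl
theorem bucketD (ex : List String) (ra : Bool) :
    ((PySem.List.pyRange 33 127 1).filter (pSelD ex ra)).map pvChr
      = pvDigits.filter (pvKeep ex ra) := by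
  have h1 : (PySem.List.pyRange 33 127 1).filter (pSelD ex ra)
      = ((PySem.List.pyRange 33 127 1).filter (fun x => !pcL x && !pcU x && pcD x)).filter
          (fun x => pvKeep ex ra (pvChr x)) := by
    rw [List.filter_filter]
    exact List.filter_congr fun x _ => by cases hk : pvKeep ex ra (pvChr x) <;> cases hl : pcL x <;> cases hu : pcU x <;> cases hd : pcD x <;> simp [pSelD, hk, hl, hu, hd]
  have h2 : (PySem.List.pyRange 33 127 1).filter (fun x => !pcL x && !pcU x && pcD x)
      = ([48,49,50,51,52,53,54,55,56,57] : List Int) := by decide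
  have h3 : pvDigits = ([48,49,50,51,52,53,54,55,56,57] : List Int).map pvChr := by decide
  rw [h1, h2, h3, List.filter_map]
  rfl
theorem bucketS (ex : List String) (ra : Bool) :
    ((PySem.List.pyRange 33 127 1).filter (pSelS ex ra)).map pvChr
      = pvPunct.filter (pvKeep ex ra) := by
  have h1 : (PySem.List.pyRange 33 127 1).filter (pSelS ex ra)
      = ((PySem.List.pyRange 33 127 1).filter (fun x => !pcL x && !pcU x && !pcD x)).filter
          (fun x => pvKeep ex ra (pvChr x)) := by
    rw [List.filter_filter]
    exact List.filter_congr fun x _ => by cases hk : pvKeep ex ra (pvChr x) <;> cases hl : pcL x <;> cases hu : pcU x <;> cases hd : pcD x <;> simp [pSelS, hk, hl, hu, hd]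
  have h2 : (PySem.List.pyRange 33 127 1).filter (fun x => !pcL x && !pcU x && !pcD x)
      = ([33,34,35,36,37,38,39,40,41,42,43,44,45,46,47,58,59,60,61,62,63,64,91,92,93,94,95,96,123,124,125,126] : List Int) := by decide
  have h3 : pvPunct = ([33,34,35,36,37,38,39,40,41,42,43,44,45,46,47,58,59,60,61,62,63,64,91,92,93,94,95,96,123,124,125,126] : List Int).map pvChr := by decide
  rw [h1, h2, h3, List.filter_map]
  rfl

-- one output segment (used to describe both programs' results)
def pvSeg (b : Bool) (name : String) (cs : List Char) : List (String × String) :=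
  if b && !cs.isEmpty then [(name, String.ofList cs)] else []

-- B's program computes the four segments in order
theorem B_eq_segs (l u d s : Bool) (ex : List String) (ra : Bool) :
    build_pools_alt l u d s ex ra
      = pvSeg l "lower" (pvLower.filter (pvKeep ex ra))
          ++ pvSeg u "upper" (pvUpper.filter (pvKeep ex ra))
          ++ pvSeg d "digits" (pvDigits.filter (pvKeep ex ra))
          ++ pvSeg s "symbols" (pvPunct.filter (pvKeep ex ra)) := by
  have hfold := foldB l u d s ex ra (PySem.List.pyRange 33 127 1) [] [] [] []
  simp only [List.nil_append] at hfold
  show ([("lower", l, _), ("upper", u, _), ("digits", d, _), ("symbols", s, _)] :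
      List (String × Bool × List Char)).foldl
      (fun acc e => if e.2.1 && !e.2.2.isEmpty then acc ++ [(e.1, String.ofList e.2.2)] else acc) [] = _
  rw [hfold]
  simp only [List.foldl_cons, List.foldl_nil, bucketL, bucketU, bucketD, bucketS, pvSeg]
  cases l <;> cases u <;> cases d <;> cases s <;>
    simp only [if_true, if_false, Bool.false_and, Bool.true_and, List.isEmpty_nil,
      Bool.not_true, if_neg (by simp : ¬ (false = true)), List.nil_append, List.append_nil] <;>
    split_ifs <;> simp_all

-- ---- A side ----

-- A's per-pool value
def pvValA (src : List Char) (ex : List String) (ra : Bool) : String :=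
  if ra then String.ofList ((pvJoinFilter src ex).toList.filter (fun ch => !(pvAmbiguous.contains (String.singleton ch))))
  else pvJoinFilter src ex

def pvPairs (l u d s : Bool) (ex : List String) (ra : Bool) : List (String × String) :=
  (if l then [("lower", pvValA pvLower ex ra)] else [])
    ++ (if u then [("upper", pvValA pvUpper ex ra)] else [])
    ++ (if d then [("digits", pvValA pvDigits ex ra)] else [])
    ++ (if s then [("symbols", pvValA pvPunct ex ra)] else [])

-- A's first two stages compute exactly pvPairs (checked case by case by the kernel)
theorem A_pairs (l u d s : Bool) (ex : List String) (ra : Bool) :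
    build_pools l u d s ex ra
      = ((pvPairs l u d s ex ra).foldl
          (fun dd kv => if kv.2 ≠ "" then PySem.Dict.insert dd kv.1 kv.2 else dd)
          (PySem.Dict.empty : PySem.Dict String String)).items := by
  cases ra <;> cases l <;> cases u <;> cases d <;> cases s <;> rfl

-- the final dict comprehension over distinct keys is just a filter on the pair list
theorem fold_comp (ps : List (String × String)) (d : PySem.Dict String String)
    (hd : ∀ kv ∈ ps, d.contains kv.1 = false)
    (hnd : (ps.map Prod.fst).Nodup) :
    (ps.foldl (fun dd kv => if kv.2 ≠ "" then PySem.Dict.insert dd kv.1 kv.2 else dd) d).items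
      = d.items ++ ps.filter (fun kv => kv.2 ≠ "") := by
  induction ps generalizing d with
  | nil => simp
  | cons kv rest ih =>
    by_cases hv : kv.2 ≠ ""
    · have hc : d.contains kv.1 = false := hd kv (by simp)
      have hk : kv.1 ∉ rest.map Prod.fst := by
        have h := hnd
        simp only [List.map_cons, List.nodup_cons] at h
        exact h.1
      have hrest : ∀ p ∈ rest, (d.insert kv.1 kv.2).contains p.1 = false := by
        intro p hp
        rw [PySem.Dict.contains_insert]
        have h1 : (p.1 == kv.1) = false := by
          rw [beq_eq_false_iff_ne]
          intro h
          exact hk (h ▸ List.mem_map_of_mem hp)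
        simp [h1, hd p (by simp [hp])]
      rw [List.foldl_cons, if_pos hv, ih (d.insert kv.1 kv.2) hrest (by simpa using hnd.of_cons),
        PySem.Dict.items_insert_of_not_contains]
      · simp [List.filter_cons, hv]
      · exact hc
    · rw [List.foldl_cons, if_neg hv, ih d (fun p hp => hd p (by simp [hp])) (by simpa using hnd.of_cons)]
      simp [List.filter_cons, hv]

theorem pairs_keys_nodup (l u d s : Bool) (ex : List String) (ra : Bool) :
    ((pvPairs l u d s ex ra).map Prod.fst).Nodup := by
  cases l <;> cases u <;> cases d <;> cases s <;> simp [pvPairs]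

-- A's value, pool by pool, is the class filtered by keep
theorem valA_eq (src : List Char) (ex : List String) (ra : Bool) :
    pvValA src ex ra = String.ofList (src.filter (pvKeep ex ra)) := by
  cases ra
  · show pvJoinFilter src ex = _
    unfold pvJoinFilter
    congr 1
    exact List.filter_congr fun c _ => by
      by_cases hx : String.singleton c ∈ ex <;> simp [pvKeep, hx]
  · show String.ofList ((pvJoinFilter src ex).toList.filter
        (fun ch => !(pvAmbiguous.contains (String.singleton ch)))) = _
    unfold pvJoinFilter
    rw [String.toList_ofList, List.filter_filter]
    congr 1
    exact List.filter_congr fun c _ => by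
      by_cases hx : String.singleton c ∈ ex <;>
        by_cases ha : String.singleton c ∈ pvAmbiguous <;> simp [pvKeep, hx, ha]

-- each filtered A-pair segment is a pvSeg
theorem seg_eq (b : Bool) (name : String) (src : List Char) (ex : List String) (ra : Bool) :
    (if b then [(name, pvValA src ex ra)] else []).filter (fun kv => kv.2 ≠ "")
      = pvSeg b name (src.filter (pvKeep ex ra)) := by
  cases b
  · simp [pvSeg]
  · show ([(name, pvValA src ex ra)] : List (String × String)).filter (fun kv => kv.2 ≠ "")
        = pvSeg true name (src.filter (pvKeep ex ra))
    unfold pvSeg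
    simp only [Bool.true_and]
    rw [valA_eq]
    by_cases h : (src.filter (pvKeep ex ra)) = []
    · rw [h]
      simp [List.filter_cons]
    · have hne : String.ofList (src.filter (pvKeep ex ra)) ≠ "" := by
        intro hh
        apply h
        have := congrArg String.toList hh
        simpa [String.toList_ofList] using this
      have hie : (src.filter (pvKeep ex ra)).isEmpty = false := by
        simp [List.isEmpty_iff, h]
      simp [List.filter_cons, hne, hie]

theorem build_pools_spec_aux (lower upper digits symbols : Bool) (exclude_chars : List String) (remove_ambiguous : Bool) :
    build_pools lower upper digits symbols exclude_chars remove_ambiguous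
      = build_pools_alt lower upper digits symbols exclude_chars remove_ambiguous := by
  rw [A_pairs, fold_comp _ _ (by simp) (pairs_keys_nodup _ _ _ _ _ _), B_eq_segs]
  simp only [pvPairs, List.filter_append, seg_eq]
  simp [PySem.Dict.empty]

-- ===== VERDICT (by name: the statement is the Claim_ definition above) =====
theorem build_pools_spec : Claim_equal_build_pools := by
  intro lower upper digits symbols exclude_chars remove_ambiguous _
  unfold Spec_build_pools
  exact build_pools_spec_aux lower upper digits symbols exclude_chars remove_ambiguous
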